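-- pv_equiv track=rewrite | github.com/himanshusaroha648/instagram-media | src/downloder.py | _pick_preferred_index
-- ===== SOURCE A (Python) =====
-- PREFERRED_QUALITY = '480p'
--
-- def _pick_preferred_index(labels: list[str], preferred: str = PREFERRED_QUALITY) -> int:
-- 	for i, q in enumerate(labels):
-- 		if q == preferred:
-- 			return i
-- 	for i, q in enumerate(labels):
-- 		if '480' in q:
-- 			return i
-- 	return max(0, (len(labels)//2) - 1)
-- ===== SOURCE B (Python) =====
-- PREFERRED_QUALITY = '480p'
--
-- def _pick_preferred_index(labels: list[str], preferred: str = PREFERRED_QUALITY) -> int: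
-- 	fallback = None
-- 	for i, q in enumerate(labels):
-- 		if q == preferred:
-- 			return i
-- 		if fallback is None and '480' in q:
-- 			fallback = i
-- 	if fallback is not None:
-- 		return fallback
-- 	return max(0, (len(labels)//2) - 1)
-- ===== Notes on version B (the rewrite author's own statement) =====
-- stated objective: alternative
-- what changed: Replaces A's two sequential enumerate scans with a single pass that returns immediately on an exact match and remembers the first '480'-substring index as a fallback, so the list is traversed once.
import Mathlib
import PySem

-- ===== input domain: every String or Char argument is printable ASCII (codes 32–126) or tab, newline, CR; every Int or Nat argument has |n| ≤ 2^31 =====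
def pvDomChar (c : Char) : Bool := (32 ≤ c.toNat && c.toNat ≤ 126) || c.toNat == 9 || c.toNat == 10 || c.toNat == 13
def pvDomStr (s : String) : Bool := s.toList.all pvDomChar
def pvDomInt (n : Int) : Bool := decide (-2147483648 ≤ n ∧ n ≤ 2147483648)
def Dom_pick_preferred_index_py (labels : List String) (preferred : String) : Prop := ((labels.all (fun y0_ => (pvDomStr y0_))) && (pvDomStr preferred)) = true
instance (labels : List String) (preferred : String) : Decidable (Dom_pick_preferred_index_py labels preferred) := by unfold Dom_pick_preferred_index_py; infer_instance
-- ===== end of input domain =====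

-- B merges A's two sequential scans into one pass with a remembered fallback index; same results, objective: alternative decomposition.

-- ===== PORT A =====
-- first enumerate loop: return i on q == preferred
def pvA_exact (labels : List String) (preferred : String) (i : Int) : Option Int :=
  match labels with
  | [] => none
  | q :: rest => if q == preferred then some i else pvA_exact rest preferred (i + 1)

-- second enumerate loop: return i on '480' in q
def pvA_sub (labels : List String) (i : Int) : Option Int :=
  match labels with
  | [] => none
  | q :: rest => if PySem.Str.isIn "480" q then some i else pvA_sub rest (i + 1)

def pick_preferred_index_py (labels : List String) (preferred : String) : Int :=
  match pvA_exact labels preferred 0 with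
  | some i => i
  | none =>
    match pvA_sub labels 0 with
    | some i => i
    | none => max 0 (PySem.Int.floordiv (labels.length : Int) 2 - 1)

-- ===== PORT B =====
-- single pass: early return on exact match, first '480' index kept in fb
def pvB_loop (labels : List String) (preferred : String) (i : Int) (fb : Option Int) (dflt : Int) : Int :=
  match labels with
  | [] => match fb with | some j => j | none => dflt
  | q :: rest =>
    if q == preferred then i
    else pvB_loop rest preferred (i + 1)
      (if fb.isNone && PySem.Str.isIn "480" q then some i else fb) dflt

def pick_preferred_index_py_alt (labels : List String) (preferred : String) : Int :=
  pvB_loop labels preferred 0 none (max 0 (PySem.Int.floordiv (labels.length : Int) 2 - 1))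

-- ===== PRECONDITION & SPEC =====
def Spec_pick_preferred_index_py (labels : List String) (preferred : String) (out : Int) : Prop := out = pick_preferred_index_py_alt labels preferred
instance (labels : List String) (preferred : String) (out : Int) : Decidable (Spec_pick_preferred_index_py labels preferred out) := by unfold Spec_pick_preferred_index_py; infer_instance

-- ===== CLAIM (what is proved, stated in full; the proofs are below) =====
def Claim_equal_pick_preferred_index_py : Prop := ∀ (labels : List String) (preferred : String), Dom_pick_preferred_index_py labels preferred → Spec_pick_preferred_index_py labels preferred (pick_preferred_index_py labels preferred)

-- ===== LEMMAS AND PROOFS =====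
theorem pvB_loop_eq (labels : List String) (preferred : String) (i : Int) (fb : Option Int) (dflt : Int) :
    pvB_loop labels preferred i fb dflt =
      match pvA_exact labels preferred i with
      | some j => j
      | none =>
        match fb with
        | some j => j
        | none =>
          match pvA_sub labels i with
          | some j => j
          | none => dflt := by
  induction labels generalizing i fb with
  | nil => rfl
  | cons q rest ih =>
    simp only [pvB_loop, pvA_exact, pvA_sub]
    by_cases hq : (q == preferred) = true
    · simp [hq]
    · simp only [hq]
      rw [ih]
      cases fb with
      | some j => simp
      | none =>
        by_cases hs : PySem.Chars.isIn ['4', '8', '0'] q.toList = true <;>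
          simp [PySem.Str.isIn, hs]

-- ===== VERDICT (by name: the statement is the Claim_ definition above) =====
theorem pick_preferred_index_py_spec : Claim_equal_pick_preferred_index_py := by
  intro labels preferred _
  unfold Spec_pick_preferred_index_py pick_preferred_index_py pick_preferred_index_py_alt
  rw [pvB_loop_eq]
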